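-- pv_equiv track=rewrite | github.com/smrutigadekar2205/armira | download_dataset.py | get_size_from_filename
-- ===== SOURCE A (Python) =====
-- def get_size_from_filename(filename):
--     """Extract size from filename."""
--     filename_lower = filename.lower()
--
--     # Check for standard sizes
--     if '_s.jpg' in filename_lower or '_s.png' in filename_lower:
--         return 'S'
--     elif '_m.jpg' in filename_lower or '_m.png' in filename_lower:
--         return 'M'
--     elif '_l.jpg' in filename_lower or '_l.png' in filename_lower:
--         return 'L'
--     elif '_xl.jpg' in filename_lower or '_xl.png' in filename_lower:
--         return 'XL'
--
--     # Check for pant sizes (waist in inches)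
--     for waist in range(28, 42):
--         if f'_{waist}.' in filename_lower:
--             # Convert waist inches to size
--             if waist <= 30:
--                 return 'S'
--             elif waist <= 32:
--                 return 'M'
--             elif waist <= 34:
--                 return 'L'
--             else:
--                 return 'XL'
--
--     return 'M'  # Default
-- ===== SOURCE B (Python) =====
-- # Single left-to-right parse of the filename: at each underscore classify what follows
-- # (letter tag before .jpg/.png, or a two-digit waist before '.'), accumulating
-- # flags and the minimum waist; one resolution step at the end replaces A's
-- # repeated substring searches over the whole string.
-- def get_size_from_filename(filename):
--     """Extract size from filename."""
--     f = filename.lower()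
--     has_s = has_m = has_l = has_xl = False
--     waist = None
--     for i in range(len(f)):
--         if f[i] == '_':
--             rest = f[i + 1:]
--             has_s = has_s or rest.startswith('s.jpg') or rest.startswith('s.png')
--             has_m = has_m or rest.startswith('m.jpg') or rest.startswith('m.png')
--             has_l = has_l or rest.startswith('l.jpg') or rest.startswith('l.png')
--             has_xl = has_xl or rest.startswith('xl.jpg') or rest.startswith('xl.png')
--             if len(rest) >= 3 and rest[0].isdigit() and rest[1].isdigit() and rest[2] == '.':
--                 w = int(rest[:2])
--                 if 28 <= w <= 41:
--                     waist = w if waist is None else min(waist, w)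
--     if has_s:
--         return 'S'
--     if has_m:
--         return 'M'
--     if has_l:
--         return 'L'
--     if has_xl:
--         return 'XL'
--     if waist is not None:
--         if waist <= 30:
--             return 'S'
--         elif waist <= 32:
--             return 'M'
--         elif waist <= 34:
--             return 'L'
--         else:
--             return 'XL'
--     return 'M'
-- ===== Notes on version B (the rewrite author's own statement) =====
-- stated objective: alternative
-- what changed: Replaced A's 22 whole-string substring searches (8 fixed patterns plus a generative range(28,42) loop) by one left-to-right positional parse that classifies the text after each underscore and accumulates four flags plus the minimum matched waist, resolved once at the end.
import Mathlib
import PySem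

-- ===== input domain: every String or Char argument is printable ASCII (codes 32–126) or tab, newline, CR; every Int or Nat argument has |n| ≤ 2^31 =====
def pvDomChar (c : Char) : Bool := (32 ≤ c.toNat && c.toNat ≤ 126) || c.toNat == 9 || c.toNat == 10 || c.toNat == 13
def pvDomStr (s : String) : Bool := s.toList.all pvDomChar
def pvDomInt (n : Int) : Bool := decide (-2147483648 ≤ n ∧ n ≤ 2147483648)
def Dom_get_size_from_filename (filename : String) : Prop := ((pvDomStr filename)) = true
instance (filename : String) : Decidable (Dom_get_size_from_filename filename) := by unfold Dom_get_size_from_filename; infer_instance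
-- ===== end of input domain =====

-- B replaces A's 22 whole-string substring searches by one left-to-right positional parse
-- that classifies the text after each underscore and accumulates flags plus the minimum waist
-- (objective: alternative; same observable behaviour).

-- ===== PORT A =====
-- literal port of A: lowercase once, branch ladder over the standard patterns, then the range(28,42) loop
def aWaistLoop (fl : List Char) : List Int → Option String
  | [] => none
  | w :: ws =>
    if PySem.Chars.isIn ('_' :: PySem.Int.toChars w ++ ['.']) fl then
      some (if w ≤ 30 then "S" else if w ≤ 32 then "M" else if w ≤ 34 then "L" else "XL")
    else aWaistLoop fl ws

def get_size_from_filename (filename : String) : String :=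
  let fl := PySem.Chars.lower filename.toList
  if PySem.Chars.isIn "_s.jpg".toList fl || PySem.Chars.isIn "_s.png".toList fl then "S"
  else if PySem.Chars.isIn "_m.jpg".toList fl || PySem.Chars.isIn "_m.png".toList fl then "M"
  else if PySem.Chars.isIn "_l.jpg".toList fl || PySem.Chars.isIn "_l.png".toList fl then "L"
  else if PySem.Chars.isIn "_xl.jpg".toList fl || PySem.Chars.isIn "_xl.png".toList fl then "XL"
  else match aWaistLoop fl (PySem.List.pyRange 28 42 1) with
    | some r => r
    | none => "M"

-- ===== PORT B =====
-- port of B (Source B): single scan; at each underscore update the four flags and the minimum waist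
-- state: (has_s, has_m, has_l, has_xl, waist)
def hitS (rest : List Char) : Bool :=
  PySem.Chars.startswith rest "s.jpg".toList || PySem.Chars.startswith rest "s.png".toList
def hitM (rest : List Char) : Bool :=
  PySem.Chars.startswith rest "m.jpg".toList || PySem.Chars.startswith rest "m.png".toList
def hitL (rest : List Char) : Bool :=
  PySem.Chars.startswith rest "l.jpg".toList || PySem.Chars.startswith rest "l.png".toList
def hitXL (rest : List Char) : Bool :=
  PySem.Chars.startswith rest "xl.jpg".toList || PySem.Chars.startswith rest "xl.png".toList

-- the waist-update statement of Source B's loop body; int(rest[:2]) is ported by hand as the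
-- two-digit value (exact: rest[0], rest[1] were just checked to be ASCII digits)
def waistUpd (w0 : Option Int) (rest : List Char) : Option Int :=
  match rest with
  | d1 :: d2 :: d3 :: _ =>
    if PySem.Chars.isdigit d1 && PySem.Chars.isdigit d2 && decide (d3 = '.') then
      let v : Int := 10 * ((d1.toNat : Int) - 48) + ((d2.toNat : Int) - 48)
      if 28 ≤ v ∧ v ≤ 41 then
        match w0 with
        | none => some v
        | some w => some (min w v)
      else w0
    else w0
  | _ => w0

def stepB (st : Bool × Bool × Bool × Bool × Option Int) (rest : List Char) :
    Bool × Bool × Bool × Bool × Option Int :=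
  (st.1 || hitS rest, st.2.1 || hitM rest, st.2.2.1 || hitL rest, st.2.2.2.1 || hitXL rest,
   waistUpd st.2.2.2.2 rest)

def loopB (st : Bool × Bool × Bool × Bool × Option Int) :
    List Char → Bool × Bool × Bool × Bool × Option Int
  | [] => st
  | c :: cs => loopB (if c = '_' then stepB st cs else st) cs

def get_size_from_filename_alt (filename : String) : String :=
  let f := PySem.Chars.lower filename.toList
  let st := loopB (false, false, false, false, none) f
  if st.1 then "S"
  else if st.2.1 then "M"
  else if st.2.2.1 then "L"
  else if st.2.2.2.1 then "XL"
  else match st.2.2.2.2 with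
    | some w => if w ≤ 30 then "S" else if w ≤ 32 then "M" else if w ≤ 34 then "L" else "XL"
    | none => "M"

-- ===== PRECONDITION & SPEC =====
def Spec_get_size_from_filename (filename : String) (out : String) : Prop := out = get_size_from_filename_alt filename
instance (filename : String) (out : String) : Decidable (Spec_get_size_from_filename filename out) := by unfold Spec_get_size_from_filename; infer_instance

-- ===== CLAIM (what is proved, stated in full; the proofs are below) =====
def Claim_equal_get_size_from_filename : Prop := ∀ (filename : String), Dom_get_size_from_filename filename → Spec_get_size_from_filename filename (get_size_from_filename filename)

-- ===== LEMMAS AND PROOFS =====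

-- proof-side characterisations of B's loop
def comb (a b : Option Int) : Option Int :=
  match b with
  | none => a
  | some v => match a with
              | none => some v
              | some w => some (min w v)

def wHit (rest : List Char) : Option Int :=
  match rest with
  | d1 :: d2 :: d3 :: _ =>
    if PySem.Chars.isdigit d1 && PySem.Chars.isdigit d2 && decide (d3 = '.') then
      let v : Int := 10 * ((d1.toNat : Int) - 48) + ((d2.toNat : Int) - 48)
      if 28 ≤ v ∧ v ≤ 41 then some v else none
    else none
  | _ => none

def scanHit (h : List Char → Bool) : List Char → Bool
  | [] => false
  | c :: cs => (if c = '_' then h cs else false) || scanHit h cs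

def mwScan : List Char → Option Int
  | [] => none
  | c :: cs => comb (if c = '_' then wHit cs else none) (mwScan cs)

def patInfix (w : Int) (fl : List Char) : Prop :=
  ('_' :: (PySem.Int.toChars w ++ ['.'])) <:+: fl

theorem comb_none_left (b : Option Int) : comb none b = b := by
  cases b <;> rfl

theorem comb_assoc (a b c : Option Int) : comb (comb a b) c = comb a (comb b c) := by
  cases a <;> cases b <;> cases c <;> simp [comb, min_assoc]

theorem waistUpd_eq (w0 : Option Int) (rest : List Char) :
    waistUpd w0 rest = comb w0 (wHit rest) := by
  rcases rest with _ | ⟨d1, _ | ⟨d2, _ | ⟨d3, t⟩⟩⟩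
  all_goals simp only [waistUpd, wHit, comb]
  all_goals split_ifs <;> cases w0 <;> rfl

theorem loop_eq (fl : List Char) (st : Bool × Bool × Bool × Bool × Option Int) :
    loopB st fl = (st.1 || scanHit hitS fl, st.2.1 || scanHit hitM fl,
      st.2.2.1 || scanHit hitL fl, st.2.2.2.1 || scanHit hitXL fl,
      comb st.2.2.2.2 (mwScan fl)) := by
  induction fl generalizing st with
  | nil => simp [loopB, scanHit, mwScan, comb]
  | cons c cs ih =>
    by_cases hc : c = '_'
    · simp only [loopB, ih, stepB, waistUpd_eq, scanHit, mwScan, if_pos hc]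
      simp [Bool.or_assoc, comb_assoc]
    · simp only [loopB, ih, scanHit, mwScan, if_neg hc]
      simp [comb_none_left]

theorem scan_or (h1 h2 : List Char → Bool) (fl : List Char) :
    scanHit (fun cs => h1 cs || h2 cs) fl = (scanHit h1 fl || scanHit h2 fl) := by
  induction fl with
  | nil => rfl
  | cons c cs ih =>
    by_cases hc : c = '_' <;>
      · simp only [scanHit, hc, if_pos, ih]
        cases h1 cs <;> cases h2 cs <;> cases scanHit h1 cs <;> cases scanHit h2 cs <;> rfl

theorem scan_eq_isIn (p : List Char) (fl : List Char) :
    scanHit (fun cs => PySem.Chars.startswith cs p) fl = PySem.Chars.isIn ('_' :: p) fl := by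
  induction fl with
  | nil =>
    rcases h : PySem.Chars.isIn ('_' :: p) [] with _ | _
    · rfl
    · exact absurd (List.eq_nil_of_infix_nil ((PySem.Chars.isIn_iff_infix _ _).mp h)) (by simp)
  | cons c cs ih =>
    apply Bool.eq_iff_iff.mpr
    simp only [scanHit, Bool.or_eq_true]
    constructor
    · rintro (h | h)
      · rw [PySem.Chars.isIn_iff_infix]
        by_cases hc : c = '_'
        · rw [if_pos hc] at h
          exact (List.infix_cons_iff).mpr (Or.inl (by
            subst hc
            exact (List.cons_prefix_cons).mpr ⟨rfl, (PySem.Chars.startswith_iff _ _).mp h⟩))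
        · rw [if_neg hc] at h; exact absurd h (by simp)
      · rw [ih] at h
        rw [PySem.Chars.isIn_iff_infix]
        exact (List.infix_cons_iff).mpr (Or.inr ((PySem.Chars.isIn_iff_infix _ _).mp h))
    · intro h
      rcases (List.infix_cons_iff).mp ((PySem.Chars.isIn_iff_infix _ _).mp h) with h | h
      · rcases (List.cons_prefix_cons).mp h with ⟨hc, hp⟩
        left
        rw [if_pos hc.symm]
        exact (PySem.Chars.startswith_iff _ _).mpr hp
      · right; rw [ih]; exact (PySem.Chars.isIn_iff_infix _ _).mpr h

theorem isdigit_iff (c : Char) : PySem.Chars.isdigit c = true ↔ 48 ≤ c.toNat ∧ c.toNat ≤ 57 := by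
  unfold PySem.Chars.isdigit
  rw [Bool.and_eq_true, decide_eq_true_iff, decide_eq_true_iff, Char.le_def, Char.le_def]
  constructor
  · rintro ⟨h1, h2⟩
    exact ⟨UInt32.le_iff_toNat_le.mp h1, UInt32.le_iff_toNat_le.mp h2⟩
  · rintro ⟨h1, h2⟩
    exact ⟨UInt32.le_iff_toNat_le.mpr h1, UInt32.le_iff_toNat_le.mpr h2⟩

theorem toChars_digits (w : Int) (h1 : 28 ≤ w) (h2 : w ≤ 41) :
    PySem.Int.toChars w = [Char.ofNat (48 + w.toNat / 10), Char.ofNat (48 + w.toNat % 10)] := by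
  interval_cases w <;> decide

theorem toNat_ofNat_digit (n : Nat) (h1 : 48 ≤ n) (h2 : n ≤ 57) : (Char.ofNat n).toNat = n := by
  rw [Char.toNat_ofNat, if_pos]
  exact Or.inl (by omega)

theorem wHit_range (rest : List Char) (w : Int) (h : wHit rest = some w) : 28 ≤ w ∧ w ≤ 41 := by
  rcases rest with _ | ⟨d1, _ | ⟨d2, _ | ⟨d3, t⟩⟩⟩
  · exact absurd h (by simp [wHit])
  · exact absurd h (by simp [wHit])
  · exact absurd h (by simp [wHit])
  · simp only [wHit] at h
    split_ifs at h with hd hr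
    · have := Option.some.inj h
      omega

theorem wHit_iff (rest : List Char) (w : Int) (h1 : 28 ≤ w) (h2 : w ≤ 41) :
    wHit rest = some w ↔ (PySem.Int.toChars w ++ ['.']) <+: rest := by
  rw [toChars_digits w h1 h2]
  have hwn1 : w.toNat / 10 ≤ 9 := by omega
  have hwn2 : w.toNat % 10 ≤ 9 := by omega
  rcases rest with _ | ⟨d1, _ | ⟨d2, _ | ⟨d3, t⟩⟩⟩
  · simp [wHit]
  · simp only [wHit, List.cons_append, List.nil_append, List.cons_prefix_cons]
    simp
  · simp only [wHit, List.cons_append, List.nil_append, List.cons_prefix_cons]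
    simp
  · simp only [wHit, List.cons_append, List.nil_append, List.cons_prefix_cons,
      List.nil_prefix, and_true]
    constructor
    · intro h
      split_ifs at h with hd hr
      · rcases Bool.and_eq_true_iff.mp hd with ⟨hd', h3⟩
        rcases Bool.and_eq_true_iff.mp hd' with ⟨hd1, hd2⟩
        have b1 := (isdigit_iff d1).mp hd1
        have b2 := (isdigit_iff d2).mp hd2
        have hv := Option.some.inj h
        have e1 : d1.toNat = 48 + w.toNat / 10 := by omega
        have e2 : d2.toNat = 48 + w.toNat % 10 := by omega
        refine ⟨?_, ?_, (of_decide_eq_true h3).symm⟩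
        · rw [← e1, Char.ofNat_toNat]
        · rw [← e2, Char.ofNat_toNat]
    · rintro ⟨e1, e2, e3⟩
      have t1 : d1.toNat = 48 + w.toNat / 10 := by
        rw [← e1, toNat_ofNat_digit _ (by omega) (by omega)]
      have t2 : d2.toNat = 48 + w.toNat % 10 := by
        rw [← e2, toNat_ofNat_digit _ (by omega) (by omega)]
      have hd1 : PySem.Chars.isdigit d1 = true := (isdigit_iff d1).mpr (by omega)
      have hd2 : PySem.Chars.isdigit d2 = true := (isdigit_iff d2).mpr (by omega)
      rw [if_pos (by simp [hd1, hd2, ← e3]), if_pos (by omega)]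
      congr 1
      omega

theorem mw_char (fl : List Char) :
    (mwScan fl = none ∧ ∀ w, 28 ≤ w → w ≤ 41 → ¬ patInfix w fl) ∨
    (∃ v, mwScan fl = some v ∧ 28 ≤ v ∧ v ≤ 41 ∧ patInfix v fl ∧
      ∀ u, 28 ≤ u → u < v → ¬ patInfix u fl) := by
  induction fl with
  | nil =>
    left
    refine ⟨rfl, fun w _ _ h => ?_⟩
    exact absurd (List.eq_nil_of_infix_nil h) (by simp)
  | cons c cs ih =>
    have hpat : ∀ u, 28 ≤ u → u ≤ 41 →
        (patInfix u (c :: cs) ↔ (c = '_' ∧ wHit cs = some u) ∨ patInfix u cs) := by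
      intro u hu1 hu2
      unfold patInfix
      rw [List.infix_cons_iff, List.cons_prefix_cons, wHit_iff cs u hu1 hu2]
      tauto
    have hhd : (if c = '_' then wHit cs else none) = none ∨
        (∃ a, (if c = '_' then wHit cs else none) = some a ∧ c = '_' ∧ wHit cs = some a) := by
      by_cases hc : c = '_'
      · rcases hw : wHit cs with _ | a
        · left; simp [hc]
        · right; exact ⟨a, by rw [if_pos hc], hc, rfl⟩

      · left; simp [hc]
    rcases hhd with hnone | ⟨a, ha, hc, hwa⟩
    · rcases ih with ⟨hmw, hall⟩ | ⟨v, hmw, hv1, hv2, hvm, hvmin⟩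
      · left
        refine ⟨by simp [mwScan, hnone, hmw, comb], fun w h1 h2 hw => ?_⟩
        rcases (hpat w h1 h2).mp hw with ⟨hc, hws⟩ | h
        · rw [if_pos hc] at hnone; rw [hnone] at hws; exact absurd hws (by simp)
        · exact hall w h1 h2 h
      · right
        refine ⟨v, by simp [mwScan, hnone, hmw, comb], hv1, hv2,
          (hpat v hv1 hv2).mpr (Or.inr hvm), fun u h1 h2 hu => ?_⟩
        rcases (hpat u h1 (by omega)).mp hu with ⟨hc, hws⟩ | h
        · rw [if_pos hc] at hnone; rw [hnone] at hws; exact absurd hws (by simp)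
        · exact hvmin u h1 h2 h
    · have ha1 := (wHit_range cs a hwa).1
      have ha2 := (wHit_range cs a hwa).2
      have hahead : patInfix a (c :: cs) := (hpat a ha1 ha2).mpr (Or.inl ⟨hc, hwa⟩)
      rcases ih with ⟨hmw, hall⟩ | ⟨v, hmw, hv1, hv2, hvm, hvmin⟩
      · right
        refine ⟨a, by simp [mwScan, ha, hmw, comb], ha1, ha2, hahead, fun u h1 h2 hu => ?_⟩
        rcases (hpat u h1 (by omega)).mp hu with ⟨_, hws⟩ | h
        · rw [hws] at hwa; have := Option.some.inj hwa; omega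
        · exact hall u h1 (by omega) h
      · right
        refine ⟨min a v, by simp [mwScan, ha, hmw, comb], by omega, by omega, ?_,
          fun u h1 h2 hu => ?_⟩
        · rcases le_total a v with hle | hle
          · rw [min_eq_left hle]; exact hahead
          · rw [min_eq_right hle]; exact (hpat v hv1 hv2).mpr (Or.inr hvm)
        · rcases (hpat u h1 (by omega)).mp hu with ⟨_, hws⟩ | h
          · rw [hws] at hwa; have := Option.some.inj hwa
            rcases min_cases a v with ⟨hm, _⟩ | ⟨hm, _⟩ <;> omega
          · exact hvmin u h1 (by rcases min_cases a v with ⟨hm, _⟩ | ⟨hm, _⟩ <;> omega) h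

theorem aw_none (l : List Int) (fl : List Char)
    (h : ∀ w ∈ l, PySem.Chars.isIn ('_' :: PySem.Int.toChars w ++ ['.']) fl = false) :
    aWaistLoop fl l = none := by
  induction l with
  | nil => rfl
  | cons a as ih =>
    simp only [aWaistLoop, h a (by simp)]
    exact ih (fun w hw => h w (by simp [hw]))

theorem aw_some (l : List Int) (fl : List Char) (v : Int)
    (hsort : List.Pairwise (· < ·) l) (hmem : v ∈ l)
    (hv : PySem.Chars.isIn ('_' :: PySem.Int.toChars v ++ ['.']) fl = true)
    (hmin : ∀ u ∈ l, u < v → PySem.Chars.isIn ('_' :: PySem.Int.toChars u ++ ['.']) fl = false) :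
    aWaistLoop fl l =
      some (if v ≤ 30 then "S" else if v ≤ 32 then "M" else if v ≤ 34 then "L" else "XL") := by
  induction l with
  | nil => exact absurd hmem (by simp)
  | cons a as ih =>
    rcases List.mem_cons.mp hmem with rfl | hmem'
    · unfold aWaistLoop
      rw [if_pos hv]
    · have hav : a < v := (List.pairwise_cons.mp hsort).1 v hmem'
      have ha : PySem.Chars.isIn ('_' :: PySem.Int.toChars a ++ ['.']) fl = false :=
        hmin a (by simp) hav
      simp only [aWaistLoop, ha, Bool.false_eq_true, if_false]
      exact ih (List.pairwise_cons.mp hsort).2 hmem' (fun u hu h => hmin u (by simp [hu]) h)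

theorem pyRange_28_42 : PySem.List.pyRange 28 42 1 =
    [28, 29, 30, 31, 32, 33, 34, 35, 36, 37, 38, 39, 40, 41] := by decide

theorem waist_branch_eq (fl : List Char) :
    (match aWaistLoop fl (PySem.List.pyRange 28 42 1) with
      | some r => r
      | none => "M") =
    (match mwScan fl with
      | some w => if w ≤ 30 then "S" else if w ≤ 32 then "M" else if w ≤ 34 then "L" else "XL"
      | none => "M") := by
  rw [pyRange_28_42]
  rcases mw_char fl with ⟨hmw, hall⟩ | ⟨v, hmw, hv1, hv2, hvm, hvmin⟩
  · rw [hmw, aw_none]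
    intro w hw
    have hb : 28 ≤ w ∧ w ≤ 41 := by fin_cases hw <;> omega
    exact (PySem.Chars.isIn_eq_false_iff _ _).mpr (hall w hb.1 hb.2)
  · rw [hmw, aw_some _ fl v (by decide) ?_ ((PySem.Chars.isIn_iff_infix _ _).mpr hvm) ?_]
    · have : v = 28 ∨ v = 29 ∨ v = 30 ∨ v = 31 ∨ v = 32 ∨ v = 33 ∨ v = 34 ∨ v = 35 ∨
          v = 36 ∨ v = 37 ∨ v = 38 ∨ v = 39 ∨ v = 40 ∨ v = 41 := by omega
      rcases this with rfl|rfl|rfl|rfl|rfl|rfl|rfl|rfl|rfl|rfl|rfl|rfl|rfl|rfl <;> decide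
    · intro u hu hlt
      have hb : 28 ≤ u := by fin_cases hu <;> omega
      exact (PySem.Chars.isIn_eq_false_iff _ _).mpr (hvmin u hb hlt)

theorem main_eq (fl : List Char) :
    (if PySem.Chars.isIn "_s.jpg".toList fl || PySem.Chars.isIn "_s.png".toList fl then "S"
     else if PySem.Chars.isIn "_m.jpg".toList fl || PySem.Chars.isIn "_m.png".toList fl then "M"
     else if PySem.Chars.isIn "_l.jpg".toList fl || PySem.Chars.isIn "_l.png".toList fl then "L"
     else if PySem.Chars.isIn "_xl.jpg".toList fl || PySem.Chars.isIn "_xl.png".toList fl then "XL"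
     else match aWaistLoop fl (PySem.List.pyRange 28 42 1) with
       | some r => r
       | none => "M") =
    (let st := loopB (false, false, false, false, none) fl
     if st.1 then "S"
     else if st.2.1 then "M"
     else if st.2.2.1 then "L"
     else if st.2.2.2.1 then "XL"
     else match st.2.2.2.2 with
       | some w => if w ≤ 30 then "S" else if w ≤ 32 then "M" else if w ≤ 34 then "L" else "XL"
       | none => "M") := by
  rw [loop_eq]
  have hS : scanHit hitS fl = (PySem.Chars.isIn "_s.jpg".toList fl || PySem.Chars.isIn "_s.png".toList fl) := by
    have := scan_or (fun cs => PySem.Chars.startswith cs "s.jpg".toList)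
      (fun cs => PySem.Chars.startswith cs "s.png".toList) fl
    unfold hitS
    rw [this, scan_eq_isIn, scan_eq_isIn,
      show ('_' :: "s.jpg".toList) = "_s.jpg".toList from by decide,
      show ('_' :: "s.png".toList) = "_s.png".toList from by decide]
  have hM : scanHit hitM fl = (PySem.Chars.isIn "_m.jpg".toList fl || PySem.Chars.isIn "_m.png".toList fl) := by
    have := scan_or (fun cs => PySem.Chars.startswith cs "m.jpg".toList)
      (fun cs => PySem.Chars.startswith cs "m.png".toList) fl
    unfold hitM
    rw [this, scan_eq_isIn, scan_eq_isIn,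
      show ('_' :: "m.jpg".toList) = "_m.jpg".toList from by decide,
      show ('_' :: "m.png".toList) = "_m.png".toList from by decide]
  have hL : scanHit hitL fl = (PySem.Chars.isIn "_l.jpg".toList fl || PySem.Chars.isIn "_l.png".toList fl) := by
    have := scan_or (fun cs => PySem.Chars.startswith cs "l.jpg".toList)
      (fun cs => PySem.Chars.startswith cs "l.png".toList) fl
    unfold hitL
    rw [this, scan_eq_isIn, scan_eq_isIn,
      show ('_' :: "l.jpg".toList) = "_l.jpg".toList from by decide,
      show ('_' :: "l.png".toList) = "_l.png".toList from by decide]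
  have hXL : scanHit hitXL fl = (PySem.Chars.isIn "_xl.jpg".toList fl || PySem.Chars.isIn "_xl.png".toList fl) := by
    have := scan_or (fun cs => PySem.Chars.startswith cs "xl.jpg".toList)
      (fun cs => PySem.Chars.startswith cs "xl.png".toList) fl
    unfold hitXL
    rw [this, scan_eq_isIn, scan_eq_isIn,
      show ('_' :: "xl.jpg".toList) = "_xl.jpg".toList from by decide,
      show ('_' :: "xl.png".toList) = "_xl.png".toList from by decide]
  simp only [Bool.false_or, comb_none_left, hS, hM, hL, hXL]
  split_ifs <;> first | rfl | exact waist_branch_eq fl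

-- ===== VERDICT (by name: the statement is the Claim_ definition above) =====
theorem get_size_from_filename_spec : Claim_equal_get_size_from_filename := by
  intro filename _
  unfold Spec_get_size_from_filename get_size_from_filename get_size_from_filename_alt
  exact main_eq _
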